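-- pv_equiv track=rewrite | github.com/tcl326/advent-of-code-2020 | day24/lobby_layout.py | parse
-- ===== SOURCE A (Python) =====
-- def parse(lines):
--     instructions = []
--     for line in lines:
--         i = 0
--         instruction = []
--         while i in range(len(line)):
--             if line[i] == 's' or line[i] == 'n':
--                 instruction.append(line[i: i + 2])
--                 i += 2
--             else:
--                 instruction.append(line[i])
--                 i += 1
--         instructions.append(instruction)
--     return instructions
-- ===== SOURCE B (Python) =====
-- def _tokenize(line):
--     tokens = []
--     pending = None
--     for c in line:
--         if pending is not None:
--             tokens.append(pending + c)
--             pending = None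
--         elif c == 'n' or c == 's':
--             pending = c
--         else:
--             tokens.append(c)
--     if pending is not None:
--         tokens.append(pending)
--     return tokens
--
-- def parse(lines):
--     return [_tokenize(line) for line in lines]
-- ===== Notes on version B (the rewrite author's own statement) =====
-- stated objective: faster
-- what changed: Replaces A's index-based while loop with per-token slicing (line[i:i+2], advance by 2 or 1) by a single stateful character pass per line that holds a pending 'n'/'s' and pairs it with the next character, flushing a pending letter at end of line.
import Mathlib
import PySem

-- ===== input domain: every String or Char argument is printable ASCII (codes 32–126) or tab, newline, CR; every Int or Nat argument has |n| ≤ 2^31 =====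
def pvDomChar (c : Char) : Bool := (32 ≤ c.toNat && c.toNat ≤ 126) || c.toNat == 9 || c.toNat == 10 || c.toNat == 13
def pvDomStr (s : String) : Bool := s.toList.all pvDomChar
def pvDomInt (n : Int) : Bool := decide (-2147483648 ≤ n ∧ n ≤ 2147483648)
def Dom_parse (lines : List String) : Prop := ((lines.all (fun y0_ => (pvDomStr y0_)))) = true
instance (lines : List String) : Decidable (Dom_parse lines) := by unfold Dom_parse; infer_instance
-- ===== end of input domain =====

-- B replaces A's index/slice while loop by one stateful left-to-right pass per line holding a
-- pending 'n'/'s' character (measured faster in a timing run); same return value on all inputs.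

-- ===== PORT A =====
-- A's while loop over the index i: at each step it reads line[i]; on 's'/'n' it appends
-- line[i:i+2] (= take 2 of the remainder) and advances by 2, else appends line[i] and
-- advances by 1.  Ported as recursion on the remaining character list (the suffix from i).
def parseLineA : List Char → List String
  | [] => []
  | c :: rest =>
    if c = 's' ∨ c = 'n' then
      String.mk (List.take 2 (c :: rest)) :: parseLineA (List.drop 1 rest)
    else
      String.mk [c] :: parseLineA rest
termination_by cs => cs.length
decreasing_by all_goals simp

def parse (lines : List String) : List (List String) :=
  lines.foldl (fun acc line => acc ++ [parseLineA line.toList]) []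

-- ===== PORT B =====
def stepB (st : List String × Option Char) (c : Char) : List String × Option Char :=
  match st.2 with
  | some p => (st.1 ++ [String.mk [p, c]], none)
  | none => if c = 'n' ∨ c = 's' then (st.1, some c) else (st.1 ++ [String.mk [c]], none)

def tokenizeB (cs : List Char) : List String :=
  let r := cs.foldl stepB ([], none)
  match r.2 with
  | some p => r.1 ++ [String.mk [p]]
  | none => r.1

def parse_alt (lines : List String) : List (List String) :=
  lines.map (fun line => tokenizeB line.toList)

-- ===== PRECONDITION & SPEC =====
def Spec_parse (lines : List String) (out : List (List String)) : Prop := out = parse_alt lines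
instance (lines : List String) (out : List (List String)) : Decidable (Spec_parse lines out) := by unfold Spec_parse; infer_instance

-- ===== CLAIM (what is proved, stated in full; the proofs are below) =====
def Claim_equal_parse : Prop := ∀ (lines : List String), Dom_parse lines → Spec_parse lines (parse lines)

-- ===== LEMMAS AND PROOFS =====

-- B's fold with a general accumulator: the token list factors out.
lemma foldl_stepB_acc (cs : List Char) : ∀ (toks : List String) (p : Option Char),
    List.foldl stepB (toks, p) cs
      = (toks ++ (List.foldl stepB ([], p) cs).1, (List.foldl stepB ([], p) cs).2) := by
  induction cs with
  | nil => intro toks p; simp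
  | cons c rest ih =>
    intro toks p
    cases p with
    | some q =>
      simp only [List.foldl_cons, stepB, List.nil_append]
      rw [ih (toks ++ [String.mk [q, c]]) none, ih [String.mk [q, c]] none]
      simp
    | none =>
      by_cases h : c = 'n' ∨ c = 's'
      · simp only [List.foldl_cons, stepB, if_pos h]
        exact ih toks (some c)
      · simp only [List.foldl_cons, stepB, if_neg h, List.nil_append]
        rw [ih (toks ++ [String.mk [c]]) none, ih [String.mk [c]] none]
        simp

lemma tokenizeB_cons_acc (cs : List Char) (toks : List String) :
    (match (List.foldl stepB (toks, none) cs).2 with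
      | some p => (List.foldl stepB (toks, none) cs).1 ++ [String.mk [p]]
      | none => (List.foldl stepB (toks, none) cs).1)
      = toks ++ tokenizeB cs := by
  rw [foldl_stepB_acc cs toks none]
  unfold tokenizeB
  rcases h : (List.foldl stepB (([] : List String), (none : Option Char)) cs) with ⟨ts, p⟩
  cases p <;> simp [h]

lemma tokenizeB_eq_parseLineA : ∀ (n : Nat) (cs : List Char), cs.length ≤ n →
    tokenizeB cs = parseLineA cs := by
  intro n
  induction n with
  | zero =>
    intro cs h
    have : cs = [] := List.eq_nil_of_length_eq_zero (Nat.le_zero.mp h)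
    subst this; simp [tokenizeB, parseLineA]
  | succ n ih =>
    intro cs h
    match cs with
    | [] => simp [tokenizeB, parseLineA]
    | c :: rest =>
      by_cases hc : c = 'n' ∨ c = 's'
      · have hc' : c = 's' ∨ c = 'n' := hc.symm
        rw [parseLineA, if_pos hc']
        match rest with
        | [] =>
          simp only [tokenizeB, List.foldl_cons, stepB, if_pos hc, List.foldl_nil]
          simp [parseLineA]
        | d :: rest' =>
          have hlen : rest'.length ≤ n := by simp at h; omega
          simp only [tokenizeB, List.foldl_cons, stepB, if_pos hc, List.nil_append]
          rw [tokenizeB_cons_acc rest' [String.mk [c, d]], ih rest' hlen]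
          simp [List.take, List.drop]
      · have hc' : ¬ (c = 's' ∨ c = 'n') := fun h' => hc h'.symm
        rw [parseLineA, if_neg hc']
        have hlen : rest.length ≤ n := by simp at h; omega
        simp only [tokenizeB, List.foldl_cons, stepB, if_neg hc, List.nil_append]
        rw [tokenizeB_cons_acc rest [String.mk [c]], ih rest hlen]
        simp

-- A's outer foldl-append loop is a map.
lemma foldl_parse_eq_map (lines : List String) (acc : List (List String)) :
    lines.foldl (fun acc line => acc ++ [parseLineA line.toList]) acc
      = acc ++ lines.map (fun line => parseLineA line.toList) := by
  induction lines generalizing acc with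
  | nil => simp
  | cons l rest ih => simp [ih]

-- ===== VERDICT (by name: the statement is the Claim_ definition above) =====
theorem parse_spec : Claim_equal_parse := by
  intro lines _
  unfold Spec_parse parse parse_alt
  rw [foldl_parse_eq_map]
  simp only [List.nil_append]
  apply List.map_congr_left
  intro l _
  exact (tokenizeB_eq_parseLineA l.toList.length l.toList le_rfl).symm
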